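-- pv_equiv track=rewrite | github.com/haukesteffen/AutoKaggle | harness/supervisor_snapshot.py | _parse_headed_blocks
-- ===== SOURCE A (Python) =====
-- def _parse_headed_blocks(text: str) -> list[tuple[str, list[str]]]:
--     blocks: list[tuple[str, list[str]]] = []
--     current_heading: str | None = None
--     current_lines: list[str] = []
--
--     for line in text.splitlines():
--         if line.startswith("## "):
--             if current_heading is not None:
--                 blocks.append((current_heading, current_lines))
--             current_heading = line[3:].strip()
--             current_lines = []
--             continue
--         if current_heading is not None:
--             current_lines.append(line)
--
--     if current_heading is not None:
--         blocks.append((current_heading, current_lines))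
--     return blocks
-- ===== SOURCE B (Python) =====
-- def _split_at_heading(lines):
--     for k, l in enumerate(lines):
--         if l.startswith("## "):
--             return lines[:k], lines[k:]
--     return lines, []
--
--
-- def _parse_headed_blocks(text: str) -> list[tuple[str, list[str]]]:
--     _, lines = _split_at_heading(text.splitlines())
--     blocks = []
--     while lines:
--         head, rest = lines[0], lines[1:]
--         body, lines = _split_at_heading(rest)
--         blocks.append((head[3:].strip(), body))
--     return blocks
-- ===== Notes on version B (the rewrite author's own statement) =====
-- stated objective: alternative
-- what changed: Replaces A's single-pass accumulator state machine (optional current heading + pending line buffer, with a final flush) by a split-at-next-heading decomposition: drop the preamble, then repeatedly take a heading and slice off its body up to the next heading.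
import Mathlib
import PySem

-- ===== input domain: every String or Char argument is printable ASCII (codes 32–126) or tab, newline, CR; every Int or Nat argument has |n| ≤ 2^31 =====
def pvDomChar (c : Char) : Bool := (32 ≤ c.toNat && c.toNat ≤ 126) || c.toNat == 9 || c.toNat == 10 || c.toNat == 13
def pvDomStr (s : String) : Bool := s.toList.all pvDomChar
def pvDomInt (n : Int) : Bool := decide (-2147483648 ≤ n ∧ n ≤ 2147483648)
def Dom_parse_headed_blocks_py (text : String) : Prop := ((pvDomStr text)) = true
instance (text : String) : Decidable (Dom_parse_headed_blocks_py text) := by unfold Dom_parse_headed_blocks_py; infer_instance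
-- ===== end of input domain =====

-- B replaces A's accumulator state machine by a split-at-next-heading decomposition (alternative, same cost).

-- ===== PORT A =====
-- A's for-loop over splitlines with state (blocks, current_heading : Option, current_lines),
-- including the final flush when the lines run out.
def pvLoopA : List String → List (String × List String) → Option String → List String →
    List (String × List String)
  | [], blocks, cur, curLines =>
    match cur with
    | none => blocks
    | some h => blocks ++ [(h, curLines)]
  | l :: ls, blocks, cur, curLines =>
    if PySem.Str.startswith l "## " then
      pvLoopA ls
        (match cur with
         | none => blocks
         | some h => blocks ++ [(h, curLines)])
        (some (PySem.Str.strip (PySem.Str.slice l (some 3) none))) []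
    else
      match cur with
      | none => pvLoopA ls blocks none curLines
      | some h => pvLoopA ls blocks (some h) (curLines ++ [l])

def parse_headed_blocks_py (text : String) : List (String × List String) :=
  pvLoopA (PySem.Str.splitlines text) [] none []

-- ===== PORT B =====
-- Source B's _split_at_heading: split lines at the first line starting with "## ".
def pvSplitAtHeading : List String → List String × List String
  | [] => ([], [])
  | l :: ls =>
    if PySem.Str.startswith l "## " then ([], l :: ls)
    else
      let p := pvSplitAtHeading ls
      (l :: p.1, p.2)

theorem pvSplitAtHeading_snd_le (ls : List String) :
    (pvSplitAtHeading ls).2.length ≤ ls.length := by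
  induction ls with
  | nil => simp [pvSplitAtHeading]
  | cons l ls ih =>
    simp only [pvSplitAtHeading]
    split
    · simp
    · simpa using Nat.le_succ_of_le ih

-- Source B's while loop: lines starts with a heading; take heading, split off body, repeat.
def pvGoB : List String → List (String × List String)
  | [] => []
  | head :: rest =>
    let p := pvSplitAtHeading rest
    (PySem.Str.strip (PySem.Str.slice head (some 3) none), p.1) :: pvGoB p.2
termination_by ls => ls.length
decreasing_by
  have := pvSplitAtHeading_snd_le rest
  simp only [List.length_cons]
  omega

def parse_headed_blocks_py_alt (text : String) : List (String × List String) :=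
  pvGoB (pvSplitAtHeading (PySem.Str.splitlines text)).2

-- ===== PRECONDITION & SPEC =====
def Spec_parse_headed_blocks_py (text : String) (out : List (String × List String)) : Prop := out = parse_headed_blocks_py_alt text
instance (text : String) (out : List (String × List String)) : Decidable (Spec_parse_headed_blocks_py text out) := by unfold Spec_parse_headed_blocks_py; infer_instance

-- ===== CLAIM (what is proved, stated in full; the proofs are below) =====
def Claim_equal_parse_headed_blocks_py : Prop := ∀ (text : String), Dom_parse_headed_blocks_py text → Spec_parse_headed_blocks_py text (parse_headed_blocks_py text)

-- ===== LEMMAS AND PROOFS =====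

-- Equation lemmas for the well-founded pvGoB.
theorem pvGoB_nil : pvGoB [] = [] := by rw [pvGoB]

theorem pvGoB_cons (head : String) (rest : List String) :
    pvGoB (head :: rest) =
      (PySem.Str.strip (PySem.Str.slice head (some 3) none), (pvSplitAtHeading rest).1) ::
        pvGoB (pvSplitAtHeading rest).2 := by rw [pvGoB]

-- Invariant of A's loop in the "have a heading" state.
theorem pvLoopA_some (ls : List String) (blocks : List (String × List String))
    (h : String) (cl : List String) :
    pvLoopA ls blocks (some h) cl =
      blocks ++ (h, cl ++ (pvSplitAtHeading ls).1) :: pvGoB (pvSplitAtHeading ls).2 := by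
  induction ls generalizing blocks h cl with
  | nil => simp [pvLoopA, pvSplitAtHeading, pvGoB_nil]
  | cons l ls ih =>
    simp only [pvLoopA, pvSplitAtHeading]
    split
    · rw [ih, pvGoB_cons]
      simp
    · rw [ih]
      simp

-- Invariant of A's loop in the "no heading yet" state.
theorem pvLoopA_none (ls : List String) (blocks : List (String × List String))
    (cl : List String) :
    pvLoopA ls blocks none cl = blocks ++ pvGoB (pvSplitAtHeading ls).2 := by
  induction ls generalizing cl with
  | nil => simp [pvLoopA, pvSplitAtHeading, pvGoB_nil]
  | cons l ls ih =>
    simp only [pvLoopA, pvSplitAtHeading]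
    split
    · rw [pvLoopA_some, pvGoB_cons]
      simp
    · exact ih cl

-- ===== VERDICT (by name: the statement is the Claim_ definition above) =====
theorem parse_headed_blocks_py_spec : Claim_equal_parse_headed_blocks_py := by
  intro text _
  unfold Spec_parse_headed_blocks_py parse_headed_blocks_py parse_headed_blocks_py_alt
  simpa using pvLoopA_none (PySem.Str.splitlines text) [] []
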